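-- pv_equiv track=rewrite | github.com/Raghul-18/n1314 | link.py | allocate_file
-- ===== SOURCE A (Python) =====
-- def allocate_file(blocks, block_size, file_name, file_size):
--     required_blocks = (file_size + block_size - 1) // block_size
--     allocated_blocks = []
--     for i in range(len(blocks)):
--         if not blocks[i]:
--             start_block = i
--             end_block = start_block + required_blocks - 1
--             if end_block < len(blocks) and all(not blocks[j] for j in range(start_block, end_block + 1)):
--                 for j in range(start_block, end_block + 1):
--                     blocks[j] = file_name
--                     allocated_blocks.append(j)
--                 break
--     return allocated_blocks
-- ===== SOURCE B (Python) =====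
-- def allocate_file(blocks, block_size, file_name, file_size):
--     required_blocks = (file_size + block_size - 1) // block_size
--     if required_blocks <= 0:
--         return []
--     run = 0
--     for i, b in enumerate(blocks):
--         run = run + 1 if not b else 0
--         if run == required_blocks:
--             start = i - required_blocks + 1
--             for j in range(start, i + 1):
--                 blocks[j] = file_name
--             return list(range(start, i + 1))
--     return []
-- ===== Notes on version B (the rewrite author's own statement) =====
-- stated objective: alternative
-- what changed: Replaces the rescan of the whole candidate window at every free block with a single pass that maintains a running count of consecutive free blocks and allocates as soon as the count reaches the required window length; avoids A's worst-case O(n*k) window rescans but is not measurably faster on the timed inputs.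
-- outside the precondition, e.g. on allocate_file([''], 0, 'f', 1): A raises ZeroDivisionError, B raises ZeroDivisionError
import Mathlib
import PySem

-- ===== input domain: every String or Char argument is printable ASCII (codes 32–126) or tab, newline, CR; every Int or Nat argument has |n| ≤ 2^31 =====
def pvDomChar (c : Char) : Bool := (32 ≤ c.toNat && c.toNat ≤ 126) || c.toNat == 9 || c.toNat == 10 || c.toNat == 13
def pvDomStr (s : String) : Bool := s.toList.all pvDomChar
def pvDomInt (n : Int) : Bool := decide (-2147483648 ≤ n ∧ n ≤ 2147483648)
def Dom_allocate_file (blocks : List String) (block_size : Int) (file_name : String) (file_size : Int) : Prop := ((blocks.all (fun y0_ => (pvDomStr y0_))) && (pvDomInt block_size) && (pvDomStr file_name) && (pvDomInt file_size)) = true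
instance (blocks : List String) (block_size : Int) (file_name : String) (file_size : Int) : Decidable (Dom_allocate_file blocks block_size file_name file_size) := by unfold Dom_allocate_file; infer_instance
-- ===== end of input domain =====

-- B replaces A's rescan of the whole candidate window at every free block with a single pass
-- maintaining a count of consecutive free blocks (allocate when it reaches the required length);
-- a structurally different traversal of the same cost on typical inputs.
-- A mutates `blocks` in place (B performs the same mutation); the equivalence proved here is
-- about the RETURN value only.

-- ===== PORT A =====
-- the `for i in range(len(blocks))` loop with its break, step for step
def pvALoop (blocks : List String) (k : Int) (i : Nat) : List Int :=
  if _h : i < blocks.length then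
    if PySem.List.pyGet? blocks (i : Int) == some "" then
      let e : Int := (i : Int) + k - 1
      if e < (blocks.length : Int) ∧
          (PySem.List.pyRange (i : Int) (e + 1) 1).all
            (fun j => PySem.List.pyGet? blocks j == some "") = true then
        -- the inner `for j in range(start, end_block+1)` append loop
        (PySem.List.pyRange (i : Int) (e + 1) 1).foldl (fun acc j => acc ++ [j]) []
      else pvALoop blocks k (i + 1)
    else pvALoop blocks k (i + 1)
  else []
termination_by blocks.length - i

def allocate_file (blocks : List String) (block_size : Int) (file_name : String) (file_size : Int) : List Int :=
  let required_blocks := PySem.Int.floordiv (file_size + block_size - 1) block_size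
  pvALoop blocks required_blocks 0

-- ===== PORT B =====
-- single pass over `enumerate(blocks)` tracking the run of consecutive free blocks
def pvBLoop : List String → Int → Nat → Int → List Int
  | [], _, _, _ => []
  | b :: rest, k, i, run =>
    let run' : Int := if b == "" then run + 1 else 0
    if run' = k then
      PySem.List.pyRange ((i : Int) - k + 1) ((i : Int) + 1) 1
    else pvBLoop rest k (i + 1) run'

def allocate_file_alt (blocks : List String) (block_size : Int) (file_name : String) (file_size : Int) : List Int :=
  let required_blocks := PySem.Int.floordiv (file_size + block_size - 1) block_size
  if required_blocks ≤ 0 then []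
  else pvBLoop blocks required_blocks 0 0

-- ===== PRECONDITION & SPEC =====
-- Python A raises ZeroDivisionError when block_size = 0; that is all Pre_ excludes.
def Pre_allocate_file (blocks : List String) (block_size : Int) (file_name : String) (file_size : Int) : Prop :=
  block_size ≠ 0

instance (blocks : List String) (block_size : Int) (file_name : String) (file_size : Int) : Decidable (Pre_allocate_file blocks block_size file_name file_size) := by unfold Pre_allocate_file; infer_instance

def pvWitness_allocate_file : List String × Int × String × Int := ([ "", "x", "", "" ], 1, "f", 2)

def Spec_allocate_file (blocks : List String) (block_size : Int) (file_name : String) (file_size : Int) (out : List Int) : Prop := out = allocate_file_alt blocks block_size file_name file_size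
instance (blocks : List String) (block_size : Int) (file_name : String) (file_size : Int) (out : List Int) : Decidable (Spec_allocate_file blocks block_size file_name file_size out) := by unfold Spec_allocate_file; infer_instance

-- ===== CLAIM (what is proved, stated in full; the proofs are below) =====
def Claim_equal_allocate_file : Prop := ∀ (blocks : List String) (block_size : Int) (file_name : String) (file_size : Int), Dom_allocate_file blocks block_size file_name file_size → Pre_allocate_file blocks block_size file_name file_size → Spec_allocate_file blocks block_size file_name file_size (allocate_file blocks block_size file_name file_size)

-- ===== LEMMAS AND PROOFS =====

-- window [s, s+K) is entirely free
def pvWFree (blocks : List String) (s K : Nat) : Bool :=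
  (List.range K).all (fun j => blocks[s + j]? == some "")

-- first s ≥ i such that the window [s, s+K) fits and is free
def pvFindS (blocks : List String) (K : Nat) (i : Nat) : Option Nat :=
  if _h : i + K ≤ blocks.length then
    if pvWFree blocks i K then some i else pvFindS blocks K (i + 1)
  else none
termination_by blocks.length + 1 - i
decreasing_by omega

def pvOut (K : Nat) : Option Nat → List Int
  | some s => PySem.List.pyRange (s : Int) ((s : Int) + (K : Int)) 1
  | none => []

theorem pvFoldlApp (l acc : List Int) : l.foldl (fun a j => a ++ [j]) acc = acc ++ l := by
  induction l generalizing acc with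
  | nil => simp
  | cons x xs ih => simp [List.foldl, ih]

theorem pvFindS_none (blocks : List String) (K i : Nat) (h : blocks.length < i + K) :
    pvFindS blocks K i = none := by
  rw [pvFindS, dif_neg (by omega)]

theorem pvFindS_step (blocks : List String) (K i : Nat)
    (h : ¬ (i + K ≤ blocks.length ∧ pvWFree blocks i K = true)) :
    pvFindS blocks K i = pvFindS blocks K (i + 1) := by
  by_cases hle : i + K ≤ blocks.length
  · have hw : pvWFree blocks i K = false := by
      cases hwf : pvWFree blocks i K
      · rfl
      · exact absurd ⟨hle, hwf⟩ h
    rw [pvFindS, dif_pos hle, if_neg (by simp [hw])]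
  · rw [pvFindS_none blocks K i (by omega), pvFindS_none blocks K (i+1) (by omega)]

theorem pvFindS_congr (blocks : List String) (K : Nat) :
    ∀ (d a : Nat), (∀ s, a ≤ s → s < a + d → ¬ (s + K ≤ blocks.length ∧ pvWFree blocks s K = true)) →
    pvFindS blocks K a = pvFindS blocks K (a + d) := by
  intro d
  induction d with
  | zero => intro a _; rfl
  | succ n ih =>
    intro a hs
    rw [pvFindS_step blocks K a (hs a (le_refl a) (by omega))]
    have := ih (a + 1) (fun s h1 h2 => hs s (by omega) (by omega))
    rw [this]; ring_nf

-- the all-check of A equals pvWFree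
theorem pvAllEq (blocks : List String) (K i : Nat) :
    (PySem.List.pyRange (i : Int) ((i : Int) + (K : Int)) 1).all
      (fun j => PySem.List.pyGet? blocks j == some "") = pvWFree blocks i K := by
  rw [PySem.List.pyRange_one]
  have h1 : (((i : Int) + (K : Int)) - (i : Int)).toNat = K := by omega
  rw [h1, List.all_map]
  unfold pvWFree
  congr 1
  funext t
  have h2 : (i : Int) + (t : Int) = ((i + t : Nat) : Int) := by push_cast; ring
  rw [Function.comp_apply, h2, PySem.List.pyGet?_natCast]

theorem pvAeq0 (blocks : List String) (k : Int) (hk : k ≤ 0) :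
    ∀ m i, blocks.length - i ≤ m → pvALoop blocks k i = [] := by
  intro m
  induction m with
  | zero =>
    intro i hi
    rw [pvALoop, dif_neg (by omega)]
  | succ n ih =>
    intro i hi
    rw [pvALoop]
    by_cases hlt : i < blocks.length
    · rw [dif_pos hlt]
      by_cases hfree : PySem.List.pyGet? blocks (i : Int) == some ""
      · rw [if_pos hfree]
        have hnil : PySem.List.pyRange ((i : Int)) (((i : Int) + k - 1) + 1) 1 = [] :=
          PySem.List.pyRange_one_eq_nil (by omega)
        rw [if_pos (⟨by omega, by rw [hnil]; rfl⟩ : _ ∧ _)]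
        rw [hnil]; rfl
      · rw [if_neg hfree]
        exact ih (i + 1) (by omega)
    · rw [dif_neg hlt]

theorem pvAeq (blocks : List String) (k : Int) (K : Nat) (hkK : k = (K : Int)) (hK : 1 ≤ K) :
    ∀ m i, blocks.length - i ≤ m → pvALoop blocks k i = pvOut K (pvFindS blocks K i) := by
  intro m
  induction m with
  | zero =>
    intro i hi
    rw [pvALoop, dif_neg (by omega), pvFindS_none blocks K i (by omega)]
    rfl
  | succ n ih =>
    intro i hi
    rw [pvALoop]
    by_cases hlt : i < blocks.length
    · rw [dif_pos hlt]
      have he1 : ((i : Int) + k - 1) + 1 = (i : Int) + (K : Int) := by omega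
      by_cases hfree : PySem.List.pyGet? blocks (i : Int) == some ""
      · rw [if_pos hfree]
        by_cases hcond : i + K ≤ blocks.length ∧ pvWFree blocks i K = true
        · rw [if_pos (⟨by omega, by rw [he1, pvAllEq]; exact hcond.2⟩ : _ ∧ _)]
          rw [pvFindS, dif_pos hcond.1, if_pos hcond.2]
          rw [he1, pvFoldlApp]
          rfl
        · rw [if_neg (by
            intro hc
            rw [he1, pvAllEq] at hc
            exact hcond ⟨by omega, hc.2⟩)]
          rw [pvFindS_step blocks K i hcond]
          exact ih (i + 1) (by omega)
      · rw [if_neg hfree]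
        have hcond : ¬ (i + K ≤ blocks.length ∧ pvWFree blocks i K = true) := by
          intro hc
          have h0 := (List.all_eq_true.mp hc.2) 0 (by simp; omega)
          simp at h0 hfree
          exact hfree (by simp [List.getElem?_eq_getElem hlt] at h0 ⊢; exact h0)
        rw [pvFindS_step blocks K i hcond]
        exact ih (i + 1) (by omega)
    · rw [dif_neg hlt]
      rw [pvFindS_none blocks K i (by omega)]
      rfl

theorem pvBeq (blocks : List String) (k : Int) (K : Nat) (hkK : k = (K : Int)) (hK : 1 ≤ K) :
    ∀ (rest : List String) (i r : Nat), rest = blocks.drop i → r ≤ i → r < K →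
    (∀ j, i - r ≤ j → j < i → blocks[j]? = some "") →
    pvBLoop rest k i (r : Int) = pvOut K (pvFindS blocks K (i - r)) := by
  intro rest
  induction rest generalizing blocks with
  | nil =>
    intro i r hdrop hri hrK _
    have hlen : blocks.length ≤ i := by
      by_contra hc
      have := congrArg List.length hdrop
      simp at this; omega
    rw [pvFindS_none blocks K (i - r) (by omega)]
    rfl
  | cons b rest' ih =>
    intro i r hdrop hri hrK hfree
    have hlen : i < blocks.length := by
      by_contra hc
      rw [List.drop_eq_nil_of_le (by omega)] at hdrop
      simp at hdrop
    have hb : blocks[i]? = some b := by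
      have h0 : (blocks.drop i)[0]? = blocks[i]? := by simp
      rw [← h0, ← hdrop]; rfl
    have hrest' : rest' = blocks.drop (i + 1) := by
      have h1 := congrArg (List.drop 1) hdrop
      simpa [List.drop_drop, Nat.add_comm] using h1
    rw [pvBLoop]
    by_cases hbe : b = ""
    · rw [show (if (b == "") = true then (r : Int) + 1 else 0) = (r : Int) + 1 from by
        simp [hbe]]
      by_cases hhit : r + 1 = K
      · rw [if_pos (by omega)]
        have hwf : pvWFree blocks (i - r) K = true := by
          simp only [pvWFree, List.all_eq_true, List.mem_range]
          intro j hj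
          by_cases hjr : j < r
          · simp [hfree ((i - r) + j) (by omega) (by omega)]
          · have hje : (i - r) + j = i := by omega
            rw [hje]
            simp [hb, hbe]
        have hfs : pvFindS blocks K (i - r) = some (i - r) := by
          rw [pvFindS, dif_pos (by omega), if_pos hwf]
        rw [hfs]
        unfold pvOut
        congr 1 <;> omega
      · rw [if_neg (by omega)]
        have hIH := ih blocks (i + 1) (r + 1) hrest' (by omega) (by omega)
          (fun j h1 h2 => by
            by_cases hji : j = i
            · rw [hji, hb, hbe]
            · exact hfree j (by omega) (by omega))
        rw [show ((r : Int) + 1) = ((r + 1 : Nat) : Int) from by push_cast; ring]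
        rw [hIH]
        congr 2
        omega
    · rw [show (if (b == "") = true then (r : Int) + 1 else 0) = ((0 : Nat) : Int) from by
        simp [hbe]]
      rw [if_neg (by omega)]
      have hIH := ih blocks (i + 1) 0 hrest' (by omega) (by omega) (fun j h1 h2 => by omega)
      rw [hIH]
      have hcong := pvFindS_congr blocks K ((i + 1) - (i - r)) (i - r) ?_
      · rw [hcong]
        congr 2
        omega
      · intro s h1 h2 hc
        have h0 := (List.all_eq_true.mp hc.2) (i - s) (by simp; omega)
        simp at h0
        rw [show s + (i - s) = i from by omega, hb] at h0
        simp at h0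
        exact hbe h0

-- ===== VERDICT (by name: the statement is the Claim_ definition above) =====
theorem allocate_file_spec : Claim_equal_allocate_file := by
  intro blocks bs name fs _dom hpre
  unfold Spec_allocate_file allocate_file allocate_file_alt
  set k := PySem.Int.floordiv (fs + bs - 1) bs with hk
  by_cases hk0 : k ≤ 0
  · rw [if_pos hk0]
    exact pvAeq0 blocks k hk0 blocks.length 0 (by omega)
  · rw [if_neg hk0]
    have hK1 : 1 ≤ k.toNat := by omega
    have hkK : k = (k.toNat : Int) := by omega
    rw [pvAeq blocks k k.toNat hkK hK1 blocks.length 0 (by omega)]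
    have := pvBeq blocks k k.toNat hkK hK1 blocks 0 0 (by simp) (le_refl 0) (by omega)
      (fun j h1 h2 => by omega)
    rw [show ((0:Nat):Int) = (0:Int) from rfl] at this
    rw [this]
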